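-- pv_equiv track=rewrite | github.com/depromeet/algoStudy | medium/1903/190313/gyu.py | solve
-- ===== SOURCE A (Python) =====
-- def solve(n, matrix):
--     ans = 0
--     for i in range(n):
--         for j in range(n):
--             ans += max([
--                 matrix[i][j],
--                 matrix[i][2 * n - j - 1],
--                 matrix[2 * n - i - 1][j],
--                 matrix[2 * n - i - 1][2 * n - j - 1],
--             ])
--     return ans
-- ===== SOURCE B (Python) =====
-- def solve(n, matrix):
--     # Build-table-then-reduce: one pass over the whole 2n x 2n matrix keeps,
--     # in a dict keyed by the canonical orbit representative
--     # (min(i, 2n-1-i), min(j, 2n-1-j)), the running maximum of each orbit;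
--     # the answer is the sum of the table's values.
--     m = 2 * n
--     best = {}
--     for i in range(m):
--         for j in range(m):
--             key = (min(i, m - 1 - i), min(j, m - 1 - j))
--             v = matrix[i][j]
--             best[key] = max(best.get(key, v), v)
--     return sum(best.values())
-- ===== Notes on version B (the rewrite author's own statement) =====
-- stated objective: alternative
-- what changed: Instead of summing each orbit's max inline over the top-left quadrant, B scans the whole 2n x 2n matrix once, builds a dict mapping each symmetry-orbit's canonical key to the running maximum of its cells, and then sums the dict's values (build-table-then-reduce).
import Mathlib
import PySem

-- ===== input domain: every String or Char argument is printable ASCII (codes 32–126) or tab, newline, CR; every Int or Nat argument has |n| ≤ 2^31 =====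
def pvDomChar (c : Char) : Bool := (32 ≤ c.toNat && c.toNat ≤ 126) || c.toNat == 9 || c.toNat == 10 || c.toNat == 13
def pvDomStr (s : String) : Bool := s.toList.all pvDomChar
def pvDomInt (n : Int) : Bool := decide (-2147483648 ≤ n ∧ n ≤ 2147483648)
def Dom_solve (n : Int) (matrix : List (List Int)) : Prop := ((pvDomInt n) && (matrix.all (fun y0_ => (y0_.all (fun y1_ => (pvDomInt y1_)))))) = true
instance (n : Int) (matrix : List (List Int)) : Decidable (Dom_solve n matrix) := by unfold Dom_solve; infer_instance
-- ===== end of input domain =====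

-- B replaces A's inline quadrant-max summation by a build-table-then-reduce pass: one scan
-- of the whole 2n x 2n matrix maintains a dict of per-orbit running maxima, then sums its values.


-- ===== PORT A =====
-- the max([...]) expression of A's loop body
def quadMax (n : Int) (matrix : List (List Int)) (i j : Int) : Int :=
  (PySem.List.max? [
     PySem.List.pyGetD (PySem.List.pyGetD matrix i []) j 0,
     PySem.List.pyGetD (PySem.List.pyGetD matrix i []) (2 * n - j - 1) 0,
     PySem.List.pyGetD (PySem.List.pyGetD matrix (2 * n - i - 1) []) j 0,
     PySem.List.pyGetD (PySem.List.pyGetD matrix (2 * n - i - 1) []) (2 * n - j - 1) 0]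
    (fun x => x)).getD 0   -- the list literal is nonempty, so max? is never none

def solve (n : Int) (matrix : List (List Int)) : Int :=
  (PySem.List.pyRange 0 n 1).foldl (fun ans i =>
    (PySem.List.pyRange 0 n 1).foldl (fun ans j => ans + quadMax n matrix i j) ans) 0

-- ===== PORT B =====
-- one pass over the full 2n x 2n matrix: dict keyed by the orbit's canonical
-- representative (min(i, m-1-i), min(j, m-1-j)) holds the orbit's running max
def solve_alt (n : Int) (matrix : List (List Int)) : Int :=
  let m := 2 * n
  ((PySem.List.pyRange 0 m 1).foldl (fun best i =>
      (PySem.List.pyRange 0 m 1).foldl (fun best j =>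
        let key := (min i (m - 1 - i), min j (m - 1 - j))
        let v := PySem.List.pyGetD (PySem.List.pyGetD matrix i []) j 0
        best.insert key (max (best.getD key v) v)) best)
    (PySem.Dict.empty : PySem.Dict (Int × Int) Int)).values.sum

-- ===== PRECONDITION & SPEC =====
-- Pre_ excludes exactly the inputs where A raises IndexError: when n > 0 it reads all
-- rows 0..2n-1 and columns 0..2n-1 of each of those rows.
def Pre_solve (n : Int) (matrix : List (List Int)) : Prop :=
  0 < n → (2 * n ≤ (matrix.length : Int) ∧
    ∀ r ∈ matrix.take (2 * n).toNat, 2 * n ≤ (r.length : Int))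
instance (n : Int) (matrix : List (List Int)) : Decidable (Pre_solve n matrix) := by
  unfold Pre_solve; infer_instance

def pvWitness_solve : Int × List (List Int) := (1, [[1, 2], [3, 4]])

def Spec_solve (n : Int) (matrix : List (List Int)) (out : Int) : Prop := out = solve_alt n matrix
instance (n : Int) (matrix : List (List Int)) (out : Int) : Decidable (Spec_solve n matrix out) := by unfold Spec_solve; infer_instance

-- ===== CLAIM (what is proved, stated in full; the proofs are below) =====
def Claim_equal_solve : Prop := ∀ (n : Int) (matrix : List (List Int)), Dom_solve n matrix → Pre_solve n matrix → Spec_solve n matrix (solve n matrix)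

-- ===== LEMMAS AND PROOFS =====

-- proof-side abbreviations
def pvCell (matrix : List (List Int)) (i j : Nat) : Int := (matrix.getD i []).getD j 0
def pvKey (N i j : Nat) : Int × Int :=
  (((min i (N + N - 1 - i) : Nat) : Int), ((min j (N + N - 1 - j) : Nat) : Int))
def pvStep (matrix : List (List Int)) (N : Nat)
    (d : PySem.Dict (Int × Int) Int) (p : Nat × Nat) : PySem.Dict (Int × Int) Int :=
  d.insert (pvKey N p.1 p.2)
    (max (d.getD (pvKey N p.1 p.2) (pvCell matrix p.1 p.2)) (pvCell matrix p.1 p.2))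
def pvPS (N : Nat) : List (Nat × Nat) :=
  (List.range (N + N)).flatMap (fun i : Nat => (List.range (N + N)).map (fun j : Nat => (i, j)))
def pvKeyList (N : Nat) : List (Int × Int) :=
  (List.range N).flatMap (fun a : Nat => (List.range N).map (fun b : Nat => ((a : Int), (b : Int))))
def pvQuad (matrix : List (List Int)) (N a b : Nat) : Int :=
  max (max (max (pvCell matrix a b) (pvCell matrix a (N + N - 1 - b)))
           (pvCell matrix (N + N - 1 - a) b))
      (pvCell matrix (N + N - 1 - a) (N + N - 1 - b))

-- generic small lemmas ----------------------------------------------------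

theorem pv_foldl_fixed {α β : Type} (f : β → α → β) (a : β) (l : List α)
    (h : ∀ x ∈ l, f a x = a) : l.foldl f a = a := by
  induction l with
  | nil => rfl
  | cons x t ih =>
    simp only [List.foldl_cons, h x (by simp)]
    exact ih (fun y hy => h y (by simp [hy]))

theorem pv_flatMap_ite {α β : Type} (l : List α) (p : α → Prop) [DecidablePred p]
    (g : α → List β) :
    l.flatMap (fun x => if p x then g x else []) =
      (l.filter (fun x => decide (p x))).flatMap g := by
  induction l with
  | nil => rfl
  | cons x t ih =>
    by_cases h : p x <;> simp [h, ih]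

theorem pv_sum_flatMap {α : Type} (l : List α) (f : α → List Int) :
    (l.flatMap f).sum = (l.map (fun x => (f x).sum)).sum := by
  induction l with
  | nil => rfl
  | cons x t ih => simp [List.flatMap_cons, ih]

theorem pv_filter_range_eq (N b : Nat) (hb : b < N) :
    (List.range N).filter (fun j => decide (j = b)) = [b] := by
  induction N with
  | zero => omega
  | succ m ih =>
    rw [List.range_succ, List.filter_append]
    by_cases h : b = m
    · subst h
      have : (List.range b).filter (fun j => decide (j = b)) = [] := by
        apply List.filter_eq_nil_iff.mpr
        intro j hj
        simp only [List.mem_range] at hj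
        simp; omega
      simp [this]
    · have hbm : b < m := by omega
      rw [ih hbm]
      have : ([m].filter (fun j => decide (j = b))) = [] := by simp; omega
      simp only [this, List.append_nil]

theorem pv_filter_range_min (N b : Nat) (hb : b < N) :
    (List.range (N + N)).filter (fun j => decide (min j (N + N - 1 - j) = b)) =
      [b, N + N - 1 - b] := by
  rw [List.range_add, List.filter_append, List.filter_map]
  have hc1 : ∀ j ∈ List.range N,
      (decide (min j (N + N - 1 - j) = b)) = (decide (j = b)) := by
    intro j hj
    simp only [List.mem_range] at hj
    simp only [decide_eq_decide]
    omega
  have hc2 : ∀ t ∈ List.range N,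
      ((fun j => decide (min j (N + N - 1 - j) = b)) ∘ (N + ·)) t = (decide (t = N - 1 - b)) := by
    intro t ht
    simp only [List.mem_range] at ht
    simp only [Function.comp_apply, decide_eq_decide]
    omega
  rw [List.filter_congr hc1, pv_filter_range_eq N b hb,
      List.filter_congr hc2, pv_filter_range_eq N (N - 1 - b) (by omega)]
  simp only [List.map_cons, List.map_nil]
  have he : N + (N - 1 - b) = N + N - 1 - b := by omega
  rw [he]
  simp

-- Set.update facts --------------------------------------------------------

theorem pv_set_update_subset {α : Type} [BEq α] [LawfulBEq α]
    (l : List α) (s : PySem.Set α) (h : ∀ x ∈ l, x ∈ s) :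
    PySem.Set.update s l = s := by
  induction l generalizing s with
  | nil => rfl
  | cons x t ih =>
    have hx : PySem.Set.add s x = s := by
      simp [PySem.Set.add, PySem.Set.contains, h x (by simp)]
    simp only [PySem.Set.update, List.foldl_cons]
    rw [show List.foldl PySem.Set.add (PySem.Set.add s x) t =
        PySem.Set.update (PySem.Set.add s x) t from rfl, hx]
    exact ih s (fun y hy => h y (by simp [hy]))

theorem pv_set_update_fresh {α : Type} [BEq α] [LawfulBEq α]
    (l : List α) (s : PySem.Set α) (hnd : l.Nodup) (h : ∀ x ∈ l, x ∉ s) :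
    PySem.Set.update s l = s ++ l := by
  induction l generalizing s with
  | nil => simp [PySem.Set.update]
  | cons x t ih =>
    have hx : PySem.Set.add s x = s ++ [x] := by
      simp [PySem.Set.add, PySem.Set.contains, h x (by simp)]
    simp only [PySem.Set.update, List.foldl_cons]
    rw [show List.foldl PySem.Set.add (PySem.Set.add s x) t =
        PySem.Set.update (PySem.Set.add s x) t from rfl, hx]
    rw [ih (s ++ [x]) hnd.of_cons ?_]
    · simp
    · intro y hy
      simp only [List.mem_append, List.mem_singleton]
      rintro (hs | rfl)
      · exact h y (by simp [hy]) hs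
      · exact (List.nodup_cons.mp hnd).1 hy

-- A is the double sum of quadMax over range(n) × range(n) ------------------

theorem solve_eq_sum (n : Int) (matrix : List (List Int)) :
    solve n matrix =
      ((List.range n.toNat).map (fun i : Nat =>
        ((List.range n.toNat).map (fun j : Nat => quadMax n matrix (i : Int) (j : Int))).sum)).sum := by
  unfold solve
  rw [PySem.List.pyRange_one]
  simp only [Int.sub_zero, zero_add, List.foldl_map]
  rw [PySem.List.foldl_congr_mem (List.range n.toNat)
      (fun (acc : Int) (i : Nat) =>
        List.foldl (fun x (j : Nat) => x + quadMax n matrix (i : Int) (j : Int)) acc (List.range n.toNat))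
      (fun (acc : Int) (i : Nat) =>
        acc + ((List.range n.toNat).map (fun j : Nat => quadMax n matrix (i : Int) (j : Int))).sum)
      0
      (fun acc i _ =>
        PySem.List.foldl_add (List.range n.toNat) (fun j : Nat => quadMax n matrix (i : Int) (j : Int)) acc)]
  rw [PySem.List.foldl_add (List.range n.toNat) (fun i : Nat => ((List.range n.toNat).map (fun j : Nat => quadMax n matrix (i : Int) (j : Int))).sum)]
  simp

-- A's loop-body max equals pvQuad -----------------------------------------

theorem quad_eq (n : Int) (matrix : List (List Int)) (hn : 0 < n) (i j : Nat)
    (hi : i < n.toNat) (hj : j < n.toNat) :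
    quadMax n matrix (i : Int) (j : Int) = pvQuad matrix n.toNat i j := by
  have ei : (2 * n - (i : Int) - 1) = ((n.toNat + n.toNat - 1 - i : Nat) : Int) := by omega
  have ej : (2 * n - (j : Int) - 1) = ((n.toNat + n.toNat - 1 - j : Nat) : Int) := by omega
  unfold quadMax pvQuad pvCell
  rw [ei, ej, PySem.List.max?_id_cons]
  simp only [PySem.List.pyGetD_natCast, Option.getD_some, List.foldl_cons, List.foldl_nil]

-- B as a single fold over all index pairs ---------------------------------

theorem solve_alt_eq_fold (n : Int) (matrix : List (List Int)) (hn : 0 < n) :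
    solve_alt n matrix =
      ((pvPS n.toNat).foldl (pvStep matrix n.toNat) PySem.Dict.empty).values.sum := by
  have hM : (2 * n - 0).toNat = n.toNat + n.toNat := by omega
  unfold solve_alt
  simp only [PySem.List.pyRange_one, hM, List.foldl_map]
  unfold pvPS
  rw [List.foldl_flatMap]
  refine congrArg (fun d : PySem.Dict (Int × Int) Int => d.values.sum) ?_
  apply PySem.List.foldl_congr_mem
  intro d i hi
  rw [List.foldl_map]
  apply PySem.List.foldl_congr_mem
  intro d' j hj
  simp only [List.mem_range] at hi hj
  have ki : min ((0 : Int) + (i : Int)) (2 * n - 1 - (0 + (i : Int))) =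
      ((min i (n.toNat + n.toNat - 1 - i) : Nat) : Int) := by omega
  have kj : min ((0 : Int) + (j : Int)) (2 * n - 1 - (0 + (j : Int))) =
      ((min j (n.toNat + n.toNat - 1 - j) : Nat) : Int) := by omega
  simp only [zero_add] at ki kj ⊢
  simp only [pvStep, pvKey, pvCell, ki, kj, PySem.List.pyGetD_natCast]

-- lookup in a max-update insert fold --------------------------------------

theorem pv_get?_maxfold {α : Type} (key : α → Int × Int) (val : α → Int)
    (ps : List α) (d : PySem.Dict (Int × Int) Int) (k : Int × Int) :
    (ps.foldl (fun d p => d.insert (key p) (max (d.getD (key p) (val p)) (val p))) d).get? k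
      = (ps.filter (fun p => decide (key p = k))).foldl
          (fun o p => some (max (o.getD (val p)) (val p))) (d.get? k) := by
  induction ps generalizing d with
  | nil => rfl
  | cons p t ih =>
    simp only [List.foldl_cons]
    have hini : (d.insert (key p) (max (d.getD (key p) (val p)) (val p))).get? k =
        if key p = k then some (max ((d.get? k).getD (val p)) (val p)) else d.get? k := by
      by_cases h : key p = k
      · rw [if_pos h, PySem.Dict.get?_insert, if_pos h.symm, PySem.Dict.getD_eq_get?_getD, h]
      · rw [if_neg h, PySem.Dict.get?_insert, if_neg (fun hk => h hk.symm)]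
    by_cases h : key p = k
    · have hfil : (p :: t).filter (fun q => decide (key q = k)) =
          p :: t.filter (fun q => decide (key q = k)) := by simp [h]
      rw [ih, hini, if_pos h, hfil, List.foldl_cons]
    · have hfil : (p :: t).filter (fun q => decide (key q = k)) =
          t.filter (fun q => decide (key q = k)) := by simp [h]
      rw [ih, hini, if_neg h, hfil]

-- the key set of the final dict -------------------------------------------

theorem pv_mem_keyList (N : Nat) (x : Int × Int) :
    x ∈ pvKeyList N ↔ ∃ a < N, ∃ b < N, x = ((a : Int), (b : Int)) := by
  unfold pvKeyList
  constructor
  · intro hx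
    obtain ⟨a, ha, hx2⟩ := List.mem_flatMap.mp hx
    obtain ⟨b, hb, rfl⟩ := List.mem_map.mp hx2
    exact ⟨a, List.mem_range.mp ha, b, List.mem_range.mp hb, rfl⟩
  · rintro ⟨a, ha, b, hb, rfl⟩
    exact List.mem_flatMap.mpr ⟨a, List.mem_range.mpr ha,
      List.mem_map.mpr ⟨b, List.mem_range.mpr hb, rfl⟩⟩

theorem pv_rowkeys (N i : Nat) (hi : i < N + N) :
    (List.range (N + N)).map (fun j => pvKey N i j) =
      ((List.range N).map (fun b : Nat => (((min i (N + N - 1 - i) : Nat) : Int), (b : Int)))) ++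
      ((List.range N).map (fun t : Nat => (((min i (N + N - 1 - i) : Nat) : Int), ((N - 1 - t : Nat) : Int)))) := by
  rw [List.range_add, List.map_append, List.map_map]
  congr 1
  · apply List.map_congr_left
    intro j hj
    simp only [List.mem_range] at hj
    unfold pvKey
    congr 1
    omega
  · apply List.map_congr_left
    intro t ht
    simp only [List.mem_range] at ht
    simp only [Function.comp_apply]
    unfold pvKey
    congr 1
    omega

-- after processing rows 0..i-1 (i ≤ N) the key set is range i × range N
def pvKeyUpTo (N i : Nat) : List (Int × Int) :=
  (List.range i).flatMap (fun a : Nat => (List.range N).map (fun b : Nat => ((a : Int), (b : Int))))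

theorem pv_mem_keyUpTo (N i : Nat) (x : Int × Int) :
    x ∈ pvKeyUpTo N i ↔ ∃ a < i, ∃ b < N, x = ((a : Int), (b : Int)) := by
  unfold pvKeyUpTo
  constructor
  · intro hx
    obtain ⟨a, ha, hx2⟩ := List.mem_flatMap.mp hx
    obtain ⟨b, hb, rfl⟩ := List.mem_map.mp hx2
    exact ⟨a, List.mem_range.mp ha, b, List.mem_range.mp hb, rfl⟩
  · rintro ⟨a, ha, b, hb, rfl⟩
    exact List.mem_flatMap.mpr ⟨a, List.mem_range.mpr ha,
      List.mem_map.mpr ⟨b, List.mem_range.mpr hb, rfl⟩⟩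

theorem pv_rowupd (N : Nat) (s : PySem.Set (Int × Int)) (i : Nat) (hi : i < N + N)
    (hmem : ∀ b < N, (((min i (N + N - 1 - i) : Nat) : Int), (b : Int)) ∈ s) :
    PySem.Set.update s ((List.range (N + N)).map (fun j => pvKey N i j)) = s := by
  rw [pv_rowkeys N i hi]
  unfold PySem.Set.update
  rw [List.foldl_append]
  rw [show ∀ l s', List.foldl PySem.Set.add s' l = PySem.Set.update s' l from fun _ _ => rfl]
  rw [show ∀ l s', List.foldl PySem.Set.add s' l = PySem.Set.update s' l from fun _ _ => rfl]
  rw [pv_set_update_subset _ s (by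
    intro x hx
    simp only [List.mem_map, List.mem_range] at hx
    obtain ⟨b, hb, rfl⟩ := hx
    exact hmem b hb)]
  apply pv_set_update_subset
  intro x hx
  simp only [List.mem_map, List.mem_range] at hx
  obtain ⟨t, ht, rfl⟩ := hx
  exact hmem (N - 1 - t) (by omega)

theorem pv_rowupd_new (N : Nat) (i : Nat) (hiN : i < N) (hN : 0 < N) :
    PySem.Set.update (pvKeyUpTo N i) ((List.range (N + N)).map (fun j => pvKey N i j)) =
      pvKeyUpTo N (i + 1) := by
  have hmin : min i (N + N - 1 - i) = i := by omega
  rw [pv_rowkeys N i (by omega)]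
  unfold PySem.Set.update
  rw [List.foldl_append]
  rw [show ∀ l s', List.foldl PySem.Set.add s' l = PySem.Set.update s' l from fun _ _ => rfl]
  rw [show ∀ l s', List.foldl PySem.Set.add s' l = PySem.Set.update s' l from fun _ _ => rfl]
  have hfresh : PySem.Set.update (pvKeyUpTo N i)
      ((List.range N).map (fun b : Nat => (((min i (N + N - 1 - i) : Nat) : Int), (b : Int)))) =
      pvKeyUpTo N i ++ (List.range N).map (fun b : Nat => (((min i (N + N - 1 - i) : Nat) : Int), (b : Int))) := by
    apply pv_set_update_fresh
    · apply List.Nodup.map ?_ (List.nodup_range)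
      intro x y hxy
      have h2 := congrArg Prod.snd hxy
      simp only at h2
      exact_mod_cast h2
    · intro x hx
      simp only [List.mem_map, List.mem_range] at hx
      obtain ⟨b, hb, rfl⟩ := hx
      rw [pv_mem_keyUpTo]
      rintro ⟨a, ha, b', hb', heq⟩
      have e1 := congrArg Prod.fst heq
      have e2 := congrArg Prod.snd heq
      simp only at e1 e2
      have e1' : a = min i (N + N - 1 - i) := by exact_mod_cast e1.symm
      omega
  rw [hfresh]
  rw [pv_set_update_subset _ _ (by
    intro x hx
    simp only [List.mem_map, List.mem_range] at hx
    obtain ⟨t, ht, rfl⟩ := hx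
    simp only [List.mem_append, List.mem_map, List.mem_range]
    right
    exact ⟨N - 1 - t, by omega, rfl⟩)]
  unfold pvKeyUpTo
  rw [List.range_succ, List.flatMap_append]
  simp [hmin]

theorem pv_keys_final (N : Nat) (matrix : List (List Int)) (hN : 0 < N) :
    ((pvPS N).foldl (pvStep matrix N) PySem.Dict.empty).keys = pvKeyList N := by
  have hstep : (pvPS N).foldl (pvStep matrix N) PySem.Dict.empty =
      (pvPS N).foldl (fun d p => d.insert ((fun p : Nat × Nat => pvKey N p.1 p.2) p)
        ((fun (d : PySem.Dict (Int × Int) Int) (p : Nat × Nat) =>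
          max (d.getD (pvKey N p.1 p.2) (pvCell matrix p.1 p.2)) (pvCell matrix p.1 p.2)) d p)) PySem.Dict.empty := rfl
  rw [hstep, PySem.Dict.keys_foldl_insert_key]
  have hke : (PySem.Dict.empty : PySem.Dict (Int × Int) Int).keys = [] := rfl
  rw [hke]
  unfold pvPS
  rw [List.map_flatMap]
  have : PySem.Set.update ([] : PySem.Set (Int × Int))
      ((List.range (N + N)).flatMap (fun i => ((List.range (N + N)).map (fun j => (i, j))).map
        (fun p : Nat × Nat => pvKey N p.1 p.2))) =
      (List.range (N + N)).foldl
        (fun s i => PySem.Set.update s ((List.range (N + N)).map (fun j => pvKey N i j))) [] := by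
    unfold PySem.Set.update
    rw [List.foldl_flatMap]
    apply PySem.List.foldl_congr_mem
    intro s i _
    rw [List.map_map]
    rfl
  rw [this]
  set g : PySem.Set (Int × Int) → Nat → PySem.Set (Int × Int) :=
    fun s i => PySem.Set.update s ((List.range (N + N)).map (fun j => pvKey N i j)) with hg
  rw [List.range_add, List.foldl_append]
  have phase1 : ∀ i ≤ N, (List.range i).foldl g [] = pvKeyUpTo N i := by
    intro i
    induction i with
    | zero => intro _; rfl
    | succ m ih =>
      intro hm
      rw [List.range_succ, List.foldl_append, ih (by omega)]
      simp only [List.foldl_cons, List.foldl_nil, hg]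
      exact pv_rowupd_new N m (by omega) hN
  rw [phase1 N (le_refl N)]
  have hfull : pvKeyUpTo N N = pvKeyList N := rfl
  rw [hfull]
  apply pv_foldl_fixed
  intro i hi
  simp only [List.mem_map, List.mem_range] at hi
  obtain ⟨r, hr, rfl⟩ := hi
  simp only [hg]
  apply pv_rowupd N _ _ (by omega)
  intro b hb
  rw [pv_mem_keyList]
  exact ⟨min (N + r) (N + N - 1 - (N + r)), by omega, b, hb, rfl⟩

-- the value stored at key (a, b) ------------------------------------------

theorem pv_filter_PS (N a b : Nat) (ha : a < N) (hb : b < N) :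
    (pvPS N).filter (fun p => decide (pvKey N p.1 p.2 = ((a : Int), (b : Int)))) =
      [(a, b), (a, N + N - 1 - b), (N + N - 1 - a, b), (N + N - 1 - a, N + N - 1 - b)] := by
  unfold pvPS
  rw [List.filter_flatMap]
  have hrow : ∀ i, ((List.range (N + N)).map (fun j => (i, j))).filter
      (fun p => decide (pvKey N p.1 p.2 = ((a : Int), (b : Int)))) =
      if min i (N + N - 1 - i) = a then [(i, b), (i, N + N - 1 - b)] else [] := by
    intro i
    rw [List.filter_map]
    by_cases hia : min i (N + N - 1 - i) = a
    · rw [if_pos hia]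
      have hc : ∀ j ∈ List.range (N + N),
          ((fun p : Nat × Nat => decide (pvKey N p.1 p.2 = ((a : Int), (b : Int)))) ∘ (fun j => (i, j))) j =
          (fun j => decide (min j (N + N - 1 - j) = b)) j := by
        intro j _
        simp only [Function.comp_apply, decide_eq_decide]
        unfold pvKey
        rw [Prod.ext_iff]
        simp only [Int.natCast_inj]
        omega
      rw [List.filter_congr hc, pv_filter_range_min N b hb]
      rfl
    · rw [if_neg hia]
      have hc : ∀ j ∈ List.range (N + N),
          ((fun p : Nat × Nat => decide (pvKey N p.1 p.2 = ((a : Int), (b : Int)))) ∘ (fun j => (i, j))) j =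
          (fun _ : Nat => false) j := by
        intro j _
        simp only [Function.comp_apply]
        unfold pvKey
        rw [decide_eq_false_iff_not]
        rw [Prod.ext_iff]
        simp only [Int.natCast_inj]
        omega
      rw [List.filter_congr hc]
      simp
  simp only [hrow]
  rw [pv_flatMap_ite, pv_filter_range_min N a ha]
  simp [List.flatMap_cons]

theorem pv_getD_final (N : Nat) (matrix : List (List Int)) (a b : Nat)
    (ha : a < N) (hb : b < N) :
    ((pvPS N).foldl (pvStep matrix N) PySem.Dict.empty).getD ((a : Int), (b : Int)) 0 =
      pvQuad matrix N a b := by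
  rw [PySem.Dict.getD_eq_get?_getD]
  have hstep : (pvPS N).foldl (pvStep matrix N) PySem.Dict.empty =
      (pvPS N).foldl (fun d p => d.insert ((fun p : Nat × Nat => pvKey N p.1 p.2) p)
        (max (d.getD ((fun p : Nat × Nat => pvKey N p.1 p.2) p) ((fun p : Nat × Nat => pvCell matrix p.1 p.2) p))
             ((fun p : Nat × Nat => pvCell matrix p.1 p.2) p))) PySem.Dict.empty := rfl
  rw [hstep, pv_get?_maxfold (fun p : Nat × Nat => pvKey N p.1 p.2) (fun p : Nat × Nat => pvCell matrix p.1 p.2)]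
  rw [pv_filter_PS N a b ha hb]
  have hge : (PySem.Dict.empty : PySem.Dict (Int × Int) Int).get? ((a : Int), (b : Int)) = none := rfl
  rw [hge]
  simp only [List.foldl_cons, List.foldl_nil, Option.getD_none, Option.getD_some, max_self]
  unfold pvQuad
  rfl

-- assembling --------------------------------------------------------------

theorem main_eq (n : Int) (matrix : List (List Int)) (hn : 0 < n) :
    solve n matrix = solve_alt n matrix := by
  set N := n.toNat with hNdef
  have hN : 0 < N := by omega
  rw [solve_eq_sum, solve_alt_eq_fold n matrix hn]
  set d := (pvPS N).foldl (pvStep matrix N) PySem.Dict.empty with hd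
  have hnd : d.keys.Nodup := by
    rw [hd]
    exact PySem.Dict.nodup_keys_foldl_insert_key (pvPS N) (fun p : Nat × Nat => pvKey N p.1 p.2)
      (fun d p => max (d.getD (pvKey N p.1 p.2) (pvCell matrix p.1 p.2)) (pvCell matrix p.1 p.2))
      PySem.Dict.empty (by exact PySem.Dict.nodup_keys_empty)
  rw [PySem.Dict.values_eq_map_keys d hnd 0]
  rw [show d.keys = pvKeyList N from hd ▸ pv_keys_final N matrix hN]
  unfold pvKeyList
  rw [List.map_flatMap]
  rw [pv_sum_flatMap]
  apply congrArg List.sum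
  apply List.map_congr_left
  intro a hamem
  simp only [List.mem_range] at hamem
  simp only [List.map_map]
  apply congrArg List.sum
  apply List.map_congr_left
  intro b hbmem
  simp only [List.mem_range] at hbmem
  simp only [Function.comp_apply]
  rw [quad_eq n matrix hn a b hamem hbmem, pv_getD_final N matrix a b hamem hbmem]

-- ===== VERDICT (by name: the statement is the Claim_ definition above) =====
theorem solve_spec : Claim_equal_solve := by
  intro n matrix _ _
  unfold Spec_solve
  by_cases hn : 0 < n
  · exact main_eq n matrix hn
  · rw [solve_eq_sum]
    have h0 : n.toNat = 0 := by omega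
    have hle : (2 * n).toNat = 0 := by omega
    simp [solve_alt, PySem.List.pyRange_one, hle, h0]
    rfl
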